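-- pv_equiv track=rewrite | github.com/hakant66/LeadAITrustFramework | apps/pii-regex-worker/worker.py | pii_severity
-- ===== SOURCE A (Python) =====
-- from typing import Any, Dict, List
--
-- def pii_severity(types: List[str]) -> str:
--     if not types:
--         return "low"
--     high = {"passport", "credit_card", "bank_account", "dob"}
--     medium = {"address"}
--     if any(t in high for t in types):
--         return "high"
--     if any(t in medium for t in types):
--         return "medium"
--     return "low"
-- ===== SOURCE B (Python) =====
-- SEVERITY_RANK = {
--     "passport": 2,
--     "credit_card": 2,
--     "bank_account": 2,
--     "dob": 2,
--     "address": 1,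
-- }
--
-- RANK_NAME = {2: "high", 1: "medium", 0: "low"}
--
-- def pii_severity(types):
--     rank = 0
--     for t in types:
--         rank = max(rank, SEVERITY_RANK.get(t, 0))
--     return RANK_NAME[rank]
-- ===== Notes on version B (the rewrite author's own statement) =====
-- stated objective: alternative
-- what changed: Replaces the two separate short-circuiting any() membership scans over set literals with a single rank-reducing pass: one dict maps each severity-bearing type to 2 or 1, the loop keeps the max rank, and the final rank is translated back to a string.
import Mathlib
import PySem

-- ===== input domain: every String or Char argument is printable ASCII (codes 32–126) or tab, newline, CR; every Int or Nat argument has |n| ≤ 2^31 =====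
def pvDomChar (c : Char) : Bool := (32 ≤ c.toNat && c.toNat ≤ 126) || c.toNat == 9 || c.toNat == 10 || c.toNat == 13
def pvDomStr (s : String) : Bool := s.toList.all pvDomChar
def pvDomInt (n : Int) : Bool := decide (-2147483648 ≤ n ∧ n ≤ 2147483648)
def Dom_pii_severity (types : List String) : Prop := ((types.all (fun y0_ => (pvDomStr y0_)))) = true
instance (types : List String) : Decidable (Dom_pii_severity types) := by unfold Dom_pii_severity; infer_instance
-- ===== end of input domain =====

-- B replaces the two any() membership scans with one max-reducing pass over a rank dictionary (alternative decomposition, same cost).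


-- ===== PORT A =====
-- Port of A: empty check, then two any-membership scans over the set literals.
def pii_severity (types : List String) : String :=
  if types = [] then "low"
  else
    let high : PySem.Set String := PySem.Set.ofList ["passport", "credit_card", "bank_account", "dob"]
    let medium : PySem.Set String := PySem.Set.ofList ["address"]
    if types.any (fun t => t ∈ high) then "high"
    else if types.any (fun t => t ∈ medium) then "medium"
    else "low"

-- ===== PORT B =====
-- Port of B: one max-reducing fold over a rank dictionary, then rank → name.
def pvSeverityRank : PySem.Dict String Int := PySem.Dict.ofList
  [("passport", 2), ("credit_card", 2), ("bank_account", 2), ("dob", 2), ("address", 1)]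

def pvRankName : PySem.Dict Int String := PySem.Dict.ofList [(2, "high"), (1, "medium"), (0, "low")]

def pii_severity_alt (types : List String) : String :=
  let rank := types.foldl (fun acc t => max acc (PySem.Dict.getD pvSeverityRank t 0)) 0
  (PySem.Dict.get? pvRankName rank).getD ""

-- ===== PRECONDITION & SPEC =====
def Spec_pii_severity (types : List String) (out : String) : Prop := out = pii_severity_alt types
instance (types : List String) (out : String) : Decidable (Spec_pii_severity types out) := by unfold Spec_pii_severity; infer_instance

-- ===== CLAIM (what is proved, stated in full; the proofs are below) =====
def Claim_equal_pii_severity : Prop := ∀ (types : List String), Dom_pii_severity types → Spec_pii_severity types (pii_severity types)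

-- ===== LEMMAS AND PROOFS =====

-- rank of a whole list, as A's branch structure computes it
def pvRankOf (l : List String) : Int :=
  if l.any (fun t => t ∈ (["passport", "credit_card", "bank_account", "dob"] : List String)) then 2
  else if l.any (fun t => t = "address") then 1 else 0

theorem pv_rank_items : pvSeverityRank.items =
    [("passport", 2), ("credit_card", 2), ("bank_account", 2), ("dob", 2), ("address", 1)] := rfl

theorem pv_getD_char (t : String) :
    PySem.Dict.getD pvSeverityRank t 0 =
      (if t ∈ (["passport", "credit_card", "bank_account", "dob"] : List String) then 2
       else if t = "address" then 1 else 0) := by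
  simp only [PySem.Dict.getD, PySem.Dict.get?, pv_rank_items, List.find?, List.mem_cons,
    List.not_mem_nil, or_false]
  by_cases h1 : t = "passport" <;> by_cases h2 : t = "credit_card" <;>
    by_cases h3 : t = "bank_account" <;> by_cases h4 : t = "dob" <;>
    by_cases h5 : t = "address" <;>
    simp_all [eq_comm]
  · have b1 : ("passport" == t) = false := by simp; exact fun h => h1 h.symm
    have b2 : ("credit_card" == t) = false := by simp; exact fun h => h2 h.symm
    have b3 : ("bank_account" == t) = false := by simp; exact fun h => h3 h.symm
    have b4 : ("dob" == t) = false := by simp; exact fun h => h4 h.symm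
    have b5 : ("address" == t) = false := by simp; exact fun h => h5 h.symm
    simp [b1, b2, b3, b4, b5]

theorem pv_foldl_rank (l : List String) (acc : Int) (hacc : 0 ≤ acc) :
    l.foldl (fun acc t => max acc (PySem.Dict.getD pvSeverityRank t 0)) acc
      = max acc (pvRankOf l) := by
  induction l generalizing acc with
  | nil => simp [pvRankOf]; omega
  | cons t l ih =>
    rw [List.foldl_cons, ih _ (le_trans hacc (le_max_left _ _))]
    rw [pv_getD_char]
    unfold pvRankOf
    simp only [List.any_cons, Bool.or_eq_true, List.any_eq_true, decide_eq_true_eq]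
    by_cases h1 : t ∈ (["passport", "credit_card", "bank_account", "dob"] : List String) <;>
      by_cases h2 : t = "address" <;>
      by_cases h3 : ∃ x ∈ l, x ∈ (["passport", "credit_card", "bank_account", "dob"] : List String) <;>
      by_cases h4 : ∃ x ∈ l, x = "address" <;>
      simp only [h1, h2, h3, h4, or_true, or_false, if_pos, if_neg, not_false_iff] <;>
      (try split_ifs) <;> omega

-- ===== VERDICT (by name: the statement is the Claim_ definition above) =====
theorem pii_severity_spec : Claim_equal_pii_severity := by
  intro types _
  unfold Spec_pii_severity pii_severity pii_severity_alt
  rw [pv_foldl_rank _ _ le_rfl]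
  rcases types with _ | ⟨t, l⟩
  · decide
  · have hsetH : ((t :: l).any fun x => decide (x ∈ PySem.Set.ofList ["passport", "credit_card", "bank_account", "dob"]))
        = ((t :: l).any fun x => decide (x ∈ (["passport", "credit_card", "bank_account", "dob"] : List String))) := by
      rw [Bool.eq_iff_iff]; simp only [List.any_eq_true, decide_eq_true_eq, PySem.Set.mem_ofList]
    have hsetM : ((t :: l).any fun x => decide (x ∈ PySem.Set.ofList ["address"]))
        = ((t :: l).any fun x => decide (x = "address")) := by
      rw [Bool.eq_iff_iff]; simp only [List.any_eq_true, decide_eq_true_eq, PySem.Set.mem_ofList,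
        List.mem_cons, List.not_mem_nil, or_false]
    simp only [if_neg (List.cons_ne_nil t l), hsetH, hsetM, pvRankOf, List.any_eq_true,
      decide_eq_true_eq, List.mem_cons, List.not_mem_nil, or_false, exists_eq_right]
    split_ifs <;> first | rfl | (simp_all [List.any_eq_true, PySem.Set.mem_ofList]; try aesop)
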